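-- pv_equiv track=rewrite | github.com/sylvaingchassang/trial-explorer | trialexplorer/studysimilarity.py | get_top_x_words
-- ===== SOURCE A (Python) =====
-- bag_of_words_topx = 25
--
-- def get_top_x_words(fdist_mc, x=bag_of_words_topx):
--     """ only gets the top x words by count """
--     cur_w_c = 0
--     res_mc = []
--     for word, n_occ in fdist_mc:
--         if cur_w_c + n_occ < x:  # case 1 we haave capacity
--             res_mc.append((word, n_occ))
--             cur_w_c += n_occ
--         else:  # case 2 fill to capacity
--             n_capacity = x - cur_w_c
--             res_mc.append((word, n_capacity))
--             cur_w_c = x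
--             return dict(res_mc)
--     return dict(res_mc)
-- ===== SOURCE B (Python) =====
-- bag_of_words_topx = 25
--
-- def get_top_x_words(fdist_mc, x=bag_of_words_topx):
--     """ only gets the top x words by count (prefix-sum decomposition) """
--     totals = []
--     t = 0
--     for _, n in fdist_mc:
--         t += n
--         totals.append(t)
--     cut = next((i for i, t in enumerate(totals) if t >= x), None)
--     if cut is None:
--         return dict(fdist_mc)
--     prev = totals[cut - 1] if cut > 0 else 0
--     return dict(fdist_mc[:cut] + [(fdist_mc[cut][0], x - prev)])
-- ===== Notes on version B (the rewrite author's own statement) =====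
-- stated objective: alternative
-- what changed: Replaces A's single stateful loop (running capacity counter with early return) by a two-pass decomposition: first compute the list of cumulative counts, then find the first index reaching x and assemble the result by slicing plus one capped boundary pair.
import Mathlib
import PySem

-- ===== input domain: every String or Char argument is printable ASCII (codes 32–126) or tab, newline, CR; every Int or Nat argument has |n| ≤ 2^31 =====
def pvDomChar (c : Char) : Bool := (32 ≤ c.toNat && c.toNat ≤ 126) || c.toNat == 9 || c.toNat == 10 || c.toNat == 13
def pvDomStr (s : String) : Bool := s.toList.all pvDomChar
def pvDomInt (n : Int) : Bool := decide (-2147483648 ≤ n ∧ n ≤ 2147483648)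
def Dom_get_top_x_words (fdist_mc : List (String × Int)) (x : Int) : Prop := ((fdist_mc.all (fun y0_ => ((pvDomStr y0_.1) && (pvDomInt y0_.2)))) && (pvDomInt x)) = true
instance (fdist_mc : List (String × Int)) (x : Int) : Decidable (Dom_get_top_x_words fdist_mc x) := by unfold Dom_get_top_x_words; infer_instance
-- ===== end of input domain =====

-- B recomputes A's result via a prefix-sum list and one slice; same value, same O(n) cost (objective: alternative).

-- ===== PORT A =====
-- the for-loop of A: state (cur_w_c, res_mc), early return on the capped branch
def goA (x : Int) : Int → List (String × Int) → List (String × Int) → List (String × Int)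
  | _cur, res, [] => res
  | cur, res, (word, n_occ) :: rest =>
    if cur + n_occ < x then goA x (cur + n_occ) (res ++ [(word, n_occ)]) rest
    else res ++ [(word, x - cur)]

def get_top_x_words (fdist_mc : List (String × Int)) (x : Int) : List (String × Int) :=
  (PySem.Dict.ofList (goA x 0 [] fdist_mc)).items

-- ===== PORT B =====
-- totals: the cumulative-count list built by B's first loop
def totalsB : Int → List (String × Int) → List Int
  | _t, [] => []
  | t, (_, n) :: rest => (t + n) :: totalsB (t + n) rest

def get_top_x_words_alt (fdist_mc : List (String × Int)) (x : Int) : List (String × Int) :=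
  let totals := totalsB 0 fdist_mc
  match totals.findIdx? (fun t => decide (x ≤ t)) with
  | none => (PySem.Dict.ofList fdist_mc).items
  | some cut =>
    let prev := if 0 < cut then totals.getD (cut - 1) 0 else 0
    (PySem.Dict.ofList (fdist_mc.take cut ++ [((fdist_mc.getD cut ("", 0)).1, x - prev)])).items

-- ===== PRECONDITION & SPEC =====
def Spec_get_top_x_words (fdist_mc : List (String × Int)) (x : Int) (out : List (String × Int)) : Prop := out = get_top_x_words_alt fdist_mc x
instance (fdist_mc : List (String × Int)) (x : Int) (out : List (String × Int)) : Decidable (Spec_get_top_x_words fdist_mc x out) := by unfold Spec_get_top_x_words; infer_instance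

-- ===== CLAIM (what is proved, stated in full; the proofs are below) =====
def Claim_equal_get_top_x_words : Prop := ∀ (fdist_mc : List (String × Int)) (x : Int), Dom_get_top_x_words fdist_mc x → Spec_get_top_x_words fdist_mc x (get_top_x_words fdist_mc x)

-- ===== LEMMAS AND PROOFS =====

-- loop invariant: A's loop from state (cur, res) equals B's assembly over the tail,
-- with prefix sums started at cur
theorem goA_eq (x : Int) (f : List (String × Int)) :
    ∀ (cur : Int) (res : List (String × Int)),
    goA x cur res f =
      match (totalsB cur f).findIdx? (fun t => decide (x ≤ t)) with
      | none => res ++ f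
      | some cut =>
        res ++ f.take cut ++
          [((f.getD cut ("", 0)).1,
            x - (if 0 < cut then (totalsB cur f).getD (cut - 1) 0 else cur))] := by
  induction f with
  | nil => intro cur res; simp [goA, totalsB]
  | cons p rest ih =>
    intro cur res
    obtain ⟨word, n⟩ := p
    by_cases h : cur + n < x
    · have hnot : ¬ x ≤ cur + n := by omega
      simp only [goA, totalsB, if_pos h, List.findIdx?_cons, decide_eq_true_eq,
        if_neg hnot]
      rw [ih (cur + n) (res ++ [(word, n)])]
      cases hfi : (totalsB (cur + n) rest).findIdx? (fun t => decide (x ≤ t)) with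
      | none => simp
      | some cut =>
        cases cut with
        | zero => simp [List.getD]
        | succ k => simp [List.getD, List.take_succ_cons]
    · have hle : x ≤ cur + n := by omega
      simp [goA, totalsB, if_neg h, List.findIdx?_cons, hle, List.getD]

theorem get_top_x_words_spec : Claim_equal_get_top_x_words := by
  intro fdist_mc x _
  unfold Spec_get_top_x_words get_top_x_words get_top_x_words_alt
  rw [goA_eq x fdist_mc 0 []]
  cases hfi : (totalsB 0 fdist_mc).findIdx? (fun t => decide (x ≤ t)) <;> simp only [hfi, List.nil_append]
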